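-- pv_equiv track=rewrite | github.com/pypi-data/pypi-mirror-286 | packages/targeting-platform/targeting_platform-0.3.3-py3-none-any.whl/targeting_platform/utils_common.py | get_time_periods
-- ===== SOURCE A (Python) =====
-- from typing import Generator, List, Any, Tuple
--
-- def get_time_periods(hods: List[int]) -> List[Tuple[int, int]]:
--     """Group list of periods per continious groups.
--
--     Args:
--     ----
--         hods (List[int]): list of hours, e.g. [0,1,5,6,2].
--
--     Returns:
--     -------
--         List[Tuple[int, int]]: continious groups, e.g. [(0,2),(5,6)].
--
--     """
--     hods = sorted(set([v for v in hods if v is not None]))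
--     time_periods = []
--     if hods:
--         period_start = hods[0]
--         for i in range(0, len(hods) - 1):
--             if hods[i] + 1 < hods[i + 1]:
--                 time_periods.append((period_start, hods[i] + 1))
--                 period_start = hods[i + 1]
--         time_periods.append((period_start, hods[-1] + 1))
--     return time_periods
-- ===== SOURCE B (Python) =====
-- def get_time_periods(hods):
--     """Group list of periods per continious groups.
--
--     Boundary-detection by set membership: an hour v starts a run iff v-1 is
--     not present, and ends a run iff v+1 is not present.  Sorting the start
--     hours and the end hours separately and zipping them pairs each run's
--     start with its end; (start, end + 1) gives the half-open interval.
--     """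
--     s = {v for v in hods if v is not None}
--     starts = sorted(v for v in s if v - 1 not in s)
--     ends = sorted(v for v in s if v + 1 not in s)
--     return [(a, b + 1) for a, b in zip(starts, ends)]
-- ===== Notes on version B (the rewrite author's own statement) =====
-- stated objective: alternative
-- what changed: Replaces A's sorted linear scan with look-ahead and a period_start accumulator by boundary detection on the set itself: run starts (v with v-1 not in the set) and run ends (v with v+1 not in the set) are collected independently by membership tests, sorted separately, and zipped into (start, end+1) pairs - no pass over the sorted list and no accumulator at all.
import Mathlib
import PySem

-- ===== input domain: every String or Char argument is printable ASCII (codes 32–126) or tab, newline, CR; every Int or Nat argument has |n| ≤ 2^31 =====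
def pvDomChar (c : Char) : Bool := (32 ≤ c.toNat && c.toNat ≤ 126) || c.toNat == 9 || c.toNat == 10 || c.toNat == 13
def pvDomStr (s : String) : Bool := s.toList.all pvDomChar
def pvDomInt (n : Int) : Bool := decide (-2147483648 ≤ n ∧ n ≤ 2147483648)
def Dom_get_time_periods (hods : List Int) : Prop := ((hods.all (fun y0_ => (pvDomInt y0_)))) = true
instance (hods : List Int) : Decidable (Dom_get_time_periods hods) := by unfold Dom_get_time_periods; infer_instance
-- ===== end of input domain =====

-- B replaces A's look-ahead scan over the sorted list (period_start accumulator, trailing append)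
-- by boundary detection on the set: run starts (v-1 absent) and run ends (v+1 absent) are found by
-- membership tests, sorted separately and zipped into (start, end+1) pairs.

-- ===== PORT A =====
-- Body of A after `hods = sorted(set([v for v in hods if v is not None]))` (the filter is vacuous
-- on a list of ints).  range(0, len(hods)-1) is pyRange; hods[i]/hods[i+1]/hods[-1] use pyGetD —
-- every index the loop reads is in range, so the default is never returned.
def pvABody (xs : List Int) : List (Int × Int) :=
  match xs with
  | [] => []
  | h0 :: _ =>
    let st := (PySem.List.pyRange 0 ((xs.length : Int) - 1)).foldl
      (fun (st : Int × List (Int × Int)) i =>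
        if PySem.List.pyGetD xs i 0 + 1 < PySem.List.pyGetD xs (i + 1) 0 then
          (PySem.List.pyGetD xs (i + 1) 0, st.2 ++ [(st.1, PySem.List.pyGetD xs i 0 + 1)])
        else st)
      (h0, [])
    st.2 ++ [(st.1, PySem.List.pyGetD xs (-1) 0 + 1)]

def get_time_periods (hods : List Int) : List (Int × Int) :=
  pvABody (PySem.List.sorted (PySem.Set.ofList hods) (fun v => v))

-- ===== PORT B =====
-- s = set(hods); starts = sorted(v for v in s if v-1 not in s); ends likewise with v+1;
-- zip + comprehension.  The sorts consume the set order-independently (sorted, no key ties).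
def get_time_periods_alt (hods : List Int) : List (Int × Int) :=
  let s : PySem.Set Int := PySem.Set.ofList hods
  let starts := PySem.List.sorted (s.filter (fun v => !(PySem.Set.contains s (v - 1)))) (fun v => v)
  let ends := PySem.List.sorted (s.filter (fun v => !(PySem.Set.contains s (v + 1)))) (fun v => v)
  (starts.zip ends).map (fun p => (p.1, p.2 + 1))

-- ===== PRECONDITION & SPEC =====
def Spec_get_time_periods (hods : List Int) (out : List (Int × Int)) : Prop := out = get_time_periods_alt hods
instance (hods : List Int) (out : List (Int × Int)) : Decidable (Spec_get_time_periods hods out) := by unfold Spec_get_time_periods; infer_instance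

-- ===== CLAIM (what is proved, stated in full; the proofs are below) =====
def Claim_equal_get_time_periods : Prop := ∀ (hods : List Int), Dom_get_time_periods hods → Spec_get_time_periods hods (get_time_periods hods)

-- ===== LEMMAS AND PROOFS =====

-- Description of A on the sorted distinct list: maximal runs as intervals, `start` the pending
-- interval's left end, `x` the last value seen.
def pvGrp (start x : Int) : List Int → List (Int × Int)
  | [] => [(start, x + 1)]
  | y :: t => if x + 1 < y then (start, x + 1) :: pvGrp y y t else pvGrp start y t

-- A's loop body over an adjacent pair of values
def pvStepZ (st : Int × List (Int × Int)) (p : Int × Int) : Int × List (Int × Int) :=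
  if p.1 + 1 < p.2 then (p.2, st.2 ++ [(st.1, p.1 + 1)]) else st

-- A's loop body over a Nat index
def pvStepI (xs : List Int) (st : Int × List (Int × Int)) (k : Nat) : Int × List (Int × Int) :=
  if xs.getD k 0 + 1 < xs.getD (k + 1) 0 then
    (xs.getD (k + 1) 0, st.2 ++ [(st.1, xs.getD k 0 + 1)])
  else st

lemma pvGetD_neg_one (x : Int) (t : List Int) :
    PySem.List.pyGetD (x :: t) (-1) 0 = (x :: t).getLast?.getD 0 := by
  simp [PySem.List.pyGetD, PySem.List.pyGet?, PySem.List.pyIdx?,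
    List.getLast?_eq_getElem?]

lemma pvRangeToI (xs : List Int) (init : Int × List (Int × Int)) :
    (PySem.List.pyRange 0 ((xs.length : Int) - 1)).foldl
      (fun (st : Int × List (Int × Int)) i =>
        if PySem.List.pyGetD xs i 0 + 1 < PySem.List.pyGetD xs (i + 1) 0 then
          (PySem.List.pyGetD xs (i + 1) 0, st.2 ++ [(st.1, PySem.List.pyGetD xs i 0 + 1)])
        else st) init
    = (List.range (xs.length - 1)).foldl (pvStepI xs) init := by
  cases xs with
  | nil =>
    rw [show ((([] : List Int).length : Int) - 1) = (-1 : Int) by simp]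
    rw [PySem.List.pyRange_one_eq_nil (by norm_num)]
    rfl
  | cons x t =>
    rw [show (((x :: t).length : Int) - 1) = ((t.length : Int)) by push_cast [List.length_cons]; ring]
    rw [PySem.List.pyRange_zero_natCast, List.foldl_map]
    have hf : (fun (st : Int × List (Int × Int)) (k : Nat) =>
        if PySem.List.pyGetD (x :: t) (k : Int) 0 + 1 < PySem.List.pyGetD (x :: t) ((k : Int) + 1) 0 then
          (PySem.List.pyGetD (x :: t) ((k : Int) + 1) 0, st.2 ++ [(st.1, PySem.List.pyGetD (x :: t) (k : Int) 0 + 1)])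
        else st) = pvStepI (x :: t) := by
      funext st k
      rw [show ((k : Int) + 1) = (((k + 1 : Nat)) : Int) by push_cast; ring]
      simp only [PySem.List.pyGetD_natCast, pvStepI]
    rw [hf]
    rfl

lemma pvAdjFold (xs : List Int) : ∀ (init : Int × List (Int × Int)),
    (List.range (xs.length - 1)).foldl (pvStepI xs) init
    = (xs.zip xs.tail).foldl pvStepZ init := by
  induction xs with
  | nil => intro init; rfl
  | cons x t ih =>
    cases t with
    | nil => intro init; rfl
    | cons y t' =>
      intro init
      have h1 : pvStepI (x :: y :: t') init 0 = pvStepZ init (x, y) := by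
        simp [pvStepI, pvStepZ]
      have h2 : (fun (st : Int × List (Int × Int)) (k : Nat) => pvStepI (x :: y :: t') st (Nat.succ k))
          = pvStepI (y :: t') := by
        funext st k
        simp [pvStepI, Nat.succ_eq_add_one]
      rw [show (x :: y :: t').length - 1 = t'.length + 1 from rfl,
        List.range_succ_eq_map, List.foldl_cons, List.foldl_map, h1, h2]
      rw [show ((x :: y :: t').zip (x :: y :: t').tail) = (x, y) :: ((y :: t').zip (y :: t').tail) from rfl,
        List.foldl_cons]
      exact ih (pvStepZ init (x, y))

lemma pvZipLoop : ∀ (t : List Int) (x start : Int) (acc : List (Int × Int)),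
    (((x :: t).zip t).foldl pvStepZ (start, acc)).2
      ++ [((((x :: t).zip t).foldl pvStepZ (start, acc)).1, (x :: t).getLast?.getD 0 + 1)]
    = acc ++ pvGrp start x t := by
  intro t
  induction t with
  | nil => intro x start acc; simp [pvGrp]
  | cons y t ih =>
    intro x start acc
    rw [List.zip_cons_cons, List.foldl_cons]
    by_cases h : x + 1 < y
    · rw [show pvStepZ (start, acc) (x, y) = (y, acc ++ [(start, x + 1)]) by simp [pvStepZ, h]]
      rw [List.getLast?_cons_cons, ih y y (acc ++ [(start, x + 1)])]
      simp [pvGrp, h]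
    · rw [show pvStepZ (start, acc) (x, y) = (start, acc) by simp [pvStepZ, h]]
      rw [List.getLast?_cons_cons, ih y start acc]
      simp [pvGrp, h]

lemma pvA_grp (x : Int) (t : List Int) : pvABody (x :: t) = pvGrp x x t := by
  simp only [pvABody]
  rw [pvRangeToI, pvAdjFold, pvGetD_neg_one]
  have := pvZipLoop t x x []
  simpa using this

-- B side.  On a strictly increasing list every element is at least the head.
lemma pvHeadLe {x : Int} {t : List Int} (h : (x :: t).Pairwise (· < ·)) :
    ∀ w ∈ x :: t, x ≤ w := by
  intro w hw
  rcases List.mem_cons.mp hw with h1 | h1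
  · exact le_of_eq h1.symm
  · exact le_of_lt ((List.pairwise_cons.mp h).1 w h1)

-- boundary filters over a fixed list L
def pvFS (L : List Int) (v : Int) : Bool := decide ((v - 1) ∉ L)
def pvFE (L : List Int) (v : Int) : Bool := decide ((v + 1) ∉ L)

-- The zip of boundary filters satisfies pvGrp's recursion.
lemma pvGrpZip : ∀ (t : List Int) (x start : Int), (x :: t).Pairwise (· < ·) →
    pvGrp start x t =
      ((start :: (((x :: t).filter (pvFS (x :: t))).tail)).zip
        ((x :: t).filter (pvFE (x :: t)))).map (fun p => (p.1, p.2 + 1)) := by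
  intro t
  induction t with
  | nil =>
    intro x start _
    have h1 : pvFS [x] x = true := by
      simp only [pvFS, decide_eq_true_eq, List.mem_singleton]; omega
    have h2 : pvFE [x] x = true := by
      simp only [pvFE, decide_eq_true_eq, List.mem_singleton]; omega
    simp [pvGrp, List.filter, h1, h2]
  | cons y t' ih =>
    intro x start hp
    have hp' : (y :: t').Pairwise (· < ·) := (List.pairwise_cons.mp hp).2
    have hxall : ∀ w ∈ y :: t', x < w := (List.pairwise_cons.mp hp).1
    have hxy : x < y := hxall y (by simp)
    have hyall : ∀ w ∈ y :: t', y ≤ w := pvHeadLe hp'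
    have htall : ∀ w ∈ t', y < w := (List.pairwise_cons.mp hp').1
    -- membership facts
    have fSx : pvFS (x :: y :: t') x = true := by
      simp only [pvFS, decide_eq_true_eq, List.mem_cons, not_or]
      refine ⟨by omega, by omega, fun hc => ?_⟩
      have := htall _ hc; omega
    have fSy : pvFS (x :: y :: t') y = !decide (y = x + 1) := by
      by_cases h : y = x + 1
      · have hm : (y - 1) ∈ x :: y :: t' := by
          simp only [List.mem_cons]; left; omega
        simp [pvFS, h]
      · have hm : (y - 1) ∉ x :: y :: t' := by
          simp only [List.mem_cons, not_or]
          refine ⟨by omega, by omega, fun hc => ?_⟩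
          have := htall _ hc; omega
        simp [pvFS, h, hm]
    have fEx : pvFE (x :: y :: t') x = !decide (y = x + 1) := by
      by_cases h : y = x + 1
      · have hm : (x + 1) ∈ x :: y :: t' := by
          simp only [List.mem_cons]; right; left; omega
        simp [pvFE, h]
      · have hm : (x + 1) ∉ x :: y :: t' := by
          simp only [List.mem_cons, not_or]
          refine ⟨by omega, by omega, fun hc => ?_⟩
          have := htall _ hc; omega
        simp [pvFE, h, hm]
    have fSy' : pvFS (y :: t') y = true := by
      simp only [pvFS, decide_eq_true_eq, List.mem_cons, not_or]
      refine ⟨by omega, fun hc => ?_⟩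
      have := htall _ hc; omega
    -- on t' (resp. y::t') the shifted membership avoids x, so the test over the longer list agrees
    have fScongr : ∀ v ∈ t', pvFS (x :: y :: t') v = pvFS (y :: t') v := by
      intro v hv
      have hvy : y < v := htall v hv
      simp only [pvFS, List.mem_cons, not_or]
      have : ¬ (v - 1 = x) := by omega
      simp [this]
    have fEcongr : ∀ v ∈ y :: t', pvFE (x :: y :: t') v = pvFE (y :: t') v := by
      intro v hv
      have hvx : x < v := hxall v hv
      simp only [pvFE, List.mem_cons, not_or]
      have : ¬ (v + 1 = x) := by omega
      simp [this]
    have hSfilt : t'.filter (pvFS (x :: y :: t')) = t'.filter (pvFS (y :: t')) :=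
      List.filter_congr fScongr
    have hEfilt : (y :: t').filter (pvFE (x :: y :: t')) = (y :: t').filter (pvFE (y :: t')) :=
      List.filter_congr fEcongr
    by_cases h : y = x + 1
    · -- run continues: y merges with x
      have e1 : ((x :: y :: t').filter (pvFS (x :: y :: t'))).tail
          = ((y :: t').filter (pvFS (y :: t'))).tail := by
        rw [List.filter_cons_of_pos fSx, List.tail_cons,
          List.filter_cons_of_neg (by rw [fSy, h]; simp), hSfilt,
          List.filter_cons_of_pos fSy', List.tail_cons]
      have e2 : (x :: y :: t').filter (pvFE (x :: y :: t'))
          = (y :: t').filter (pvFE (y :: t')) := by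
        rw [List.filter_cons_of_neg (by rw [fEx, h]; simp), hEfilt]
      rw [show pvGrp start x (y :: t') = pvGrp start y t' by simp [pvGrp]; omega,
        ih y start hp', e1, e2]
    · have hlt : x + 1 < y := by omega
      have e1 : ((x :: y :: t').filter (pvFS (x :: y :: t'))).tail
          = y :: t'.filter (pvFS (y :: t')) := by
        rw [List.filter_cons_of_pos fSx, List.tail_cons,
          List.filter_cons_of_pos (by rw [fSy]; simp [h]), hSfilt]
      have e2 : (x :: y :: t').filter (pvFE (x :: y :: t'))
          = x :: (y :: t').filter (pvFE (y :: t')) := by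
        rw [List.filter_cons_of_pos (by rw [fEx]; simp [h]), hEfilt]
      have ih' := ih y y hp'
      rw [List.filter_cons_of_pos fSy', List.tail_cons] at ih'
      rw [show pvGrp start x (y :: t') = (start, x + 1) :: pvGrp y y t' by
        simp [pvGrp, hlt], ih', e1, e2, List.zip_cons_cons, List.map_cons]

-- B's two sorted filtered subsets, rewritten over the sorted distinct list xs
lemma pvMainEq (s xs : List Int) (hxs : PySem.List.sorted s (fun v => v) = xs)
    (hp : xs.Pairwise (· < ·)) :
    pvABody xs =
      ((PySem.List.sorted (s.filter (fun v => !(PySem.Set.contains s (v - 1)))) (fun v => v)).zip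
        (PySem.List.sorted (s.filter (fun v => !(PySem.Set.contains s (v + 1)))) (fun v => v))).map
        (fun p => (p.1, p.2 + 1)) := by
  have hperm : xs.Perm s := hxs ▸ PySem.List.sorted_perm s (fun v => v) false
  -- the membership tests agree between s and xs, and sorting the filtered subset of s
  -- is the filtered sorted list
  have hpred : ∀ (f : Int → Int),
      s.filter (fun v => !(PySem.Set.contains s (f v)))
        = s.filter (fun v => decide (f v ∉ xs)) := by
    intro f
    apply List.filter_congr
    intro v _
    by_cases hm : f v ∈ xs
    · have hms : f v ∈ s := hperm.mem_iff.mp hm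
      simp [PySem.Set.contains_eq_listContains, hm, hms]
    · have hms : f v ∉ s := fun hc => hm (hperm.mem_iff.mpr hc)
      simp [PySem.Set.contains_eq_listContains, hm, hms]
  have hsortf : ∀ (p : Int → Bool),
      PySem.List.sorted (s.filter p) (fun v => v) = xs.filter p := by
    intro p
    exact PySem.List.sorted_eq_of_perm_of_pairwise_lt _ _ _ (hperm.filter p)
      (List.Pairwise.sublist (List.filter_sublist (p := p)) hp)
  have hS : PySem.List.sorted (s.filter (fun v => !(PySem.Set.contains s (v - 1)))) (fun v => v)
      = xs.filter (pvFS xs) := by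
    rw [hpred (fun v => v - 1), hsortf]; rfl
  have hE : PySem.List.sorted (s.filter (fun v => !(PySem.Set.contains s (v + 1)))) (fun v => v)
      = xs.filter (pvFE xs) := by
    rw [hpred (fun v => v + 1), hsortf]; rfl
  rw [hS, hE]
  rcases xs with _ | ⟨x, t⟩
  · simp [pvABody]
  · rw [pvA_grp, pvGrpZip t x x hp]
    have fSx : pvFS (x :: t) x = true := by
      simp only [pvFS, decide_eq_true_eq, List.mem_cons, not_or]
      refine ⟨by omega, fun hc => ?_⟩
      have := pvHeadLe hp _ (List.mem_cons_of_mem x hc)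
      omega
    rw [List.filter_cons_of_pos fSx, List.tail_cons]

lemma pvCore (hods : List Int) :
    get_time_periods hods = get_time_periods_alt hods := by
  unfold get_time_periods get_time_periods_alt
  exact pvMainEq (PySem.Set.ofList hods) _ rfl
    (PySem.List.sorted_ofList_pairwise_lt hods)

-- ===== VERDICT (by name: the statement is the Claim_ definition above) =====
theorem get_time_periods_spec : Claim_equal_get_time_periods := by
  unfold Claim_equal_get_time_periods
  intro hods _
  unfold Spec_get_time_periods
  exact pvCore hods
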